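-- pv_equiv track=rewrite | github.com/mediwind/PS_Algorithm | 백준/Silver/16237. 이삿짐센터/이삿짐센터.py | min_baskets
-- ===== SOURCE A (Python) =====
-- def min_baskets(A, B, C, D, E):
--     weights = [1] * A + [2] * B + [3] * C + [4] * D + [5] * E
--     weights.sort(reverse=True)
--
--     baskets = 0
--     while weights:
--         current_weight = 0
--         i = 0
--         while i < len(weights):
--             if current_weight + weights[i] <= 5:
--                 current_weight += weights[i]
--                 weights.pop(i)
--             else:
--                 i += 1
--         baskets += 1
--
--     return baskets
-- ===== SOURCE B (Python) =====
-- def min_baskets(A, B, C, D, E):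
--     # O(1) arithmetic simulation of the deterministic greedy over the counts.
--     a, b, c, d, e = max(A, 0), max(B, 0), max(C, 0), max(D, 0), max(E, 0)
--     baskets = e + d                  # each 5 alone; each 4 with one 1 if available
--     a -= min(a, d)
--     baskets += c                     # each 3 with a 2, else with up to two 1s
--     t = min(b, c)
--     b -= t
--     a -= min(a, 2 * (c - t))
--     baskets += b // 2                # two 2s per basket, plus one 1 if available
--     a -= min(a, b // 2)
--     if b % 2 == 1:                   # lone 2 with up to three 1s
--         baskets += 1
--         a -= min(a, 3)
--     baskets += (a + 4) // 5          # remaining 1s, five per basket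
--     return baskets
-- ===== Notes on version B (the rewrite author's own statement) =====
-- stated objective: faster
-- what changed: Replaces the explicit list build + sort + repeated greedy pop-scan with a closed-form O(1) arithmetic simulation of the same deterministic greedy over the five counts.
import Mathlib
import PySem

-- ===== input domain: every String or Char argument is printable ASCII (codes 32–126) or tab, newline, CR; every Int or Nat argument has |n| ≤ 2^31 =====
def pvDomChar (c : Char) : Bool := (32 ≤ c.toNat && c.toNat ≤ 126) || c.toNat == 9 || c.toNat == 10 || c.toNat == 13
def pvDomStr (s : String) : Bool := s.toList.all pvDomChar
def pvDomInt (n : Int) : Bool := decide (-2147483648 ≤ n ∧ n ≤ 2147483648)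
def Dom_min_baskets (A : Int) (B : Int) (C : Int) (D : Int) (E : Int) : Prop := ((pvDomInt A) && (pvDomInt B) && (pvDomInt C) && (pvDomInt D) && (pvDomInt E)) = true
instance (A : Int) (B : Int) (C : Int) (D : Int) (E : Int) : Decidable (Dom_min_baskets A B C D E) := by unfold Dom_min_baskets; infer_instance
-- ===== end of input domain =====

-- B replaces A's build-sort-and-repeatedly-pop greedy with an O(1) arithmetic simulation
-- of the same deterministic greedy over the five item counts.


-- ===== PORT A =====
-- inner while loop: `while i < len(weights): if cur + weights[i] <= 5: take and pop(i) else i += 1`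
def pvInner (cur : Int) (i : Nat) (ws : List Int) : List Int :=
  if h : i < ws.length then
    if cur + ws[i] ≤ 5 then pvInner (cur + ws[i]) i (ws.eraseIdx i)
    else pvInner cur (i + 1) ws
  else ws
termination_by ws.length - i
decreasing_by
  · simp [List.length_eraseIdx, h]; omega
  · omega

-- outer while loop: `while weights: <fill one basket>; baskets += 1`.  The dite guard only
-- totalizes the recursion (Python would diverge if a basket removed nothing, which never
-- happens for weight lists drawn from 1..5).
def pvOuter (ws : List Int) (baskets : Int) : Int :=
  if ws.isEmpty then baskets
  else
    if h : (pvInner 0 0 ws).length < ws.length then pvOuter (pvInner 0 0 ws) (baskets + 1)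
    else baskets + 1
termination_by ws.length

def min_baskets (A : Int) (B : Int) (C : Int) (D : Int) (E : Int) : Int :=
  pvOuter (PySem.List.sorted
    (List.replicate A.toNat (1 : Int) ++ List.replicate B.toNat 2 ++ List.replicate C.toNat 3 ++
      List.replicate D.toNat 4 ++ List.replicate E.toNat 5) (fun x => x) true) 0

-- ===== PORT B =====
def min_baskets_alt (A : Int) (B : Int) (C : Int) (D : Int) (E : Int) : Int :=
  let a0 := max A 0
  let b0 := max B 0
  let c := max C 0
  let d := max D 0
  let e := max E 0
  let baskets0 := e + d
  let a1 := a0 - min a0 d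
  let baskets1 := baskets0 + c
  let t := min b0 c
  let b1 := b0 - t
  let a2 := a1 - min a1 (2 * (c - t))
  let baskets2 := baskets1 + PySem.Int.floordiv b1 2
  let a3 := a2 - min a2 (PySem.Int.floordiv b1 2)
  let baskets3 := if PySem.Int.mod b1 2 = 1 then baskets2 + 1 else baskets2
  let a4 := if PySem.Int.mod b1 2 = 1 then a3 - min a3 3 else a3
  baskets3 + PySem.Int.floordiv (a4 + 4) 5

-- ===== PRECONDITION & SPEC =====
def Spec_min_baskets (A : Int) (B : Int) (C : Int) (D : Int) (E : Int) (out : Int) : Prop := out = min_baskets_alt A B C D E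
instance (A : Int) (B : Int) (C : Int) (D : Int) (E : Int) (out : Int) : Decidable (Spec_min_baskets A B C D E out) := by unfold Spec_min_baskets; infer_instance

-- ===== CLAIM (what is proved, stated in full; the proofs are below) =====
def Claim_equal_min_baskets : Prop := ∀ (A : Int) (B : Int) (C : Int) (D : Int) (E : Int), Dom_min_baskets A B C D E → Spec_min_baskets A B C D E (min_baskets A B C D E)

-- ===== LEMMAS AND PROOFS =====

-- the canonical descending weight list: e fives, d fours, c threes, b twos, a ones
def pvCanon (e d c b a : Nat) : List Int :=
  List.replicate e 5 ++ (List.replicate d 4 ++ (List.replicate c 3 ++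
    (List.replicate b 2 ++ (List.replicate a 1 ++ []))))

-- how many copies of w the basket takes from a block of n copies, starting at load cur
def pvTaken (cur w : Int) (n : Nat) : Nat :=
  match n with
  | 0 => 0
  | n + 1 => if cur + w ≤ 5 then pvTaken (cur + w) w n + 1 else 0

-- the closed arithmetic form, on clamped Nat counts
def pvA1 (d a : Nat) : Nat := a - min a d
def pvA2 (d c b a : Nat) : Nat := pvA1 d a - min (pvA1 d a) (2 * (c - min b c))
def pvA3 (d c b a : Nat) : Nat := pvA2 d c b a - min (pvA2 d c b a) ((b - min b c) / 2)
def pvA4 (d c b a : Nat) : Nat :=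
  if (b - min b c) % 2 = 1 then pvA3 d c b a - min (pvA3 d c b a) 3 else pvA3 d c b a
def pvF (e d c b a : Nat) : Nat :=
  e + d + c + (b - min b c) / 2 + (if (b - min b c) % 2 = 1 then 1 else 0) + (pvA4 d c b a + 4) / 5

lemma pvInner_nil (cur : Int) (i : Nat) : pvInner cur i [] = [] := by
  rw [pvInner]; simp

lemma eraseIdx_append_shift (xs ys : List Int) (j : Nat) :
    (xs ++ ys).eraseIdx (xs.length + j) = xs ++ ys.eraseIdx j := by
  induction xs with
  | nil => simp
  | cons x xs ih => simp [Nat.succ_add, ih]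

lemma pvInner_offset (cur : Int) (j : Nat) (ys xs : List Int) :
    pvInner cur (xs.length + j) (xs ++ ys) = xs ++ pvInner cur j ys := by
  fun_induction pvInner cur j ys with
  | case1 cur j ys h hfit ih =>
    rw [pvInner]
    have hl : xs.length + j < (xs ++ ys).length := by simp; omega
    have hg : (xs ++ ys)[xs.length + j]'hl = ys[j] := by
      rw [List.getElem_append_right (by omega)]; congr 1; omega
    simp only [hl, dif_pos, hg, hfit, if_pos, eraseIdx_append_shift]
    exact ih
  | case2 cur j ys h hfit ih =>
    rw [pvInner]
    have hl : xs.length + j < (xs ++ ys).length := by simp; omega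
    have hg : (xs ++ ys)[xs.length + j]'hl = ys[j] := by
      rw [List.getElem_append_right (by omega)]; congr 1; omega
    simp only [hl, dif_pos, hg, hfit, if_neg]
    rw [show xs.length + j + 1 = xs.length + (j+1) by omega]
    exact ih
  | case3 cur j ys h =>
    rw [pvInner]
    have hnl : ¬ (xs.length + j < (xs ++ ys).length) := by simp at h ⊢; omega
    simp only [hnl, dif_neg]
    rw [pvInner]
    simp [h]

lemma pvInner_skip_prefix {cur w : Int} (hw : ¬ cur + w ≤ 5) (n : Nat) (rest : List Int) :
    ∀ m k, k + m = n → pvInner cur k (List.replicate n w ++ rest) = pvInner cur n (List.replicate n w ++ rest) := by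
  intro m
  induction m with
  | zero => intro k hk; rw [show k = n by omega]
  | succ m ih =>
    intro k hk
    conv_lhs => rw [pvInner]
    have hl : k < (List.replicate n w ++ rest).length := by simp; omega
    have hg : (List.replicate n w ++ rest)[k]'hl = w := by
      rw [List.getElem_append_left (by simp; omega)]; simp
    simp only [hl, dif_pos, hg, hw, if_neg]
    exact ih (k+1) (by omega)

lemma pvInner_block (w : Int) (n : Nat) (rest : List Int) (cur : Int) :
    pvInner cur 0 (List.replicate n w ++ rest) =
      List.replicate (n - pvTaken cur w n) w ++ pvInner (cur + (pvTaken cur w n : Int) * w) 0 rest := by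
  induction n generalizing cur with
  | zero => simp [pvTaken]
  | succ n ih =>
    by_cases hfit : cur + w ≤ 5
    · conv_lhs => rw [pvInner]
      have hl : 0 < (List.replicate (n+1) w ++ rest).length := by simp
      have hg : (List.replicate (n+1) w ++ rest)[0]'hl = w := by
        rw [List.getElem_append_left (by simp)]; simp
      have he : (List.replicate (n+1) w ++ rest).eraseIdx 0 = List.replicate n w ++ rest := by
        rw [List.replicate_succ]; simp
      simp only [hl, dif_pos, hg, hfit, if_pos, he]
      rw [ih (cur + w)]
      have ht : pvTaken cur w (n+1) = pvTaken (cur + w) w n + 1 := by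
        simp [pvTaken, hfit]
      rw [ht]
      congr 2
      · omega
      · push_cast; ring
    · have ht : pvTaken cur w (n+1) = 0 := by simp [pvTaken, hfit]
      rw [ht, pvInner_skip_prefix hfit (n+1) rest (n+1) 0 (by omega)]
      have := pvInner_offset cur 0 rest (List.replicate (n+1) w)
      simp only [List.length_replicate, Nat.add_zero] at this
      rw [this]
      simp

lemma pvInner_nofit (cur : Int) (i : Nat) (l : List Int) :
    (∀ x ∈ l, ¬ cur + x ≤ 5) → pvInner cur i l = l := by
  fun_induction pvInner cur i l with
  | case1 cur i l hi hfit ih =>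
    intro h; exact absurd hfit (h _ (l.getElem_mem hi))
  | case2 cur i l hi hfit ih =>
    intro h
    rw [pvInner, ← pvInner]
    exact ih h
  | case3 cur i l hi =>
    intro h
    rfl

lemma pvTaken_stop {cur w : Int} (h : ¬ cur + w ≤ 5) (n : Nat) : pvTaken cur w n = 0 := by
  cases n <;> simp [pvTaken, h]

lemma pvTaken_one (n : Nat) (cur : Int) (h : 0 ≤ cur) : pvTaken cur 1 n = min n (5 - cur).toNat := by
  induction n generalizing cur with
  | zero => simp [pvTaken]
  | succ n ih =>
    by_cases hfit : cur + 1 ≤ 5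
    · rw [pvTaken, if_pos hfit, ih (cur + 1) (by omega)]
      omega
    · rw [pvTaken, if_neg hfit]
      omega

lemma canon_length (e d c b a : Nat) : (pvCanon e d c b a).length = e + d + c + b + a := by
  simp [pvCanon]; omega

-- one basket step, case by case on the leading nonzero count
lemma pvInner_block_nil (w : Int) (n : Nat) (cur : Int) :
    pvInner cur 0 (List.replicate n w) = List.replicate (n - pvTaken cur w n) w := by
  have h := pvInner_block w n [] cur
  simpa [pvInner_nil] using h

lemma pvStep_e (e d c b a : Nat) : pvInner 0 0 (pvCanon (e+1) d c b a) = pvCanon e d c b a := by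
  unfold pvCanon
  simp only [List.append_nil]
  rw [pvInner_block]
  have t5 : pvTaken 0 5 (e+1) = 1 := by
    simp [pvTaken, pvTaken_stop (show ¬(5:Int)+5 ≤ 5 by norm_num)]
  rw [t5, pvInner_nofit _ _ _ (by intro x hx; simp [List.mem_replicate] at hx; omega)]
  norm_num

lemma pvStep_d0 (d c b : Nat) : pvInner 0 0 (pvCanon 0 (d+1) c b 0) = pvCanon 0 d c b 0 := by
  unfold pvCanon
  simp only [List.replicate_zero, List.nil_append, List.append_nil]
  rw [pvInner_block]
  have t4 : pvTaken 0 4 (d+1) = 1 := by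
    simp [pvTaken, pvTaken_stop (show ¬(4:Int)+4 ≤ 5 by norm_num)]
  rw [t4, pvInner_nofit _ _ _ (by intro x hx; simp [List.mem_replicate] at hx; omega)]
  norm_num

lemma pvStep_da (d c b a : Nat) : pvInner 0 0 (pvCanon 0 (d+1) c b (a+1)) = pvCanon 0 d c b a := by
  unfold pvCanon
  simp only [List.replicate_zero, List.nil_append, List.append_nil]
  rw [pvInner_block]
  have t4 : pvTaken 0 4 (d+1) = 1 := by
    simp [pvTaken, pvTaken_stop (show ¬(4:Int)+4 ≤ 5 by norm_num)]
  rw [t4]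
  norm_num
  rw [pvInner_block, pvTaken_stop (show ¬(4:Int)+3 ≤ 5 by norm_num)]
  norm_num
  rw [pvInner_block, pvTaken_stop (show ¬(4:Int)+2 ≤ 5 by norm_num)]
  norm_num
  rw [pvInner_block_nil, pvTaken_one _ _ (by norm_num)]
  congr 1
  omega

lemma pvStep_cb (c b a : Nat) : pvInner 0 0 (pvCanon 0 0 (c+1) (b+1) a) = pvCanon 0 0 c b a := by
  unfold pvCanon
  simp only [List.replicate_zero, List.nil_append, List.append_nil]
  rw [pvInner_block]
  have t3 : pvTaken 0 3 (c+1) = 1 := by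
    simp [pvTaken, pvTaken_stop (show ¬(3:Int)+3 ≤ 5 by norm_num)]
  rw [t3]
  norm_num
  rw [pvInner_block]
  have t2 : pvTaken 3 2 (b+1) = 1 := by
    simp [pvTaken, pvTaken_stop (show ¬(5:Int)+2 ≤ 5 by norm_num)]
  rw [t2]
  norm_num
  rw [pvInner_nofit _ _ _ (by intro x hx; simp [List.mem_replicate] at hx; omega)]

lemma pvStep_c0 (c a : Nat) : pvInner 0 0 (pvCanon 0 0 (c+1) 0 a) = pvCanon 0 0 c 0 (a - 2) := by
  unfold pvCanon
  simp only [List.replicate_zero, List.nil_append, List.append_nil]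
  rw [pvInner_block]
  have t3 : pvTaken 0 3 (c+1) = 1 := by
    simp [pvTaken, pvTaken_stop (show ¬(3:Int)+3 ≤ 5 by norm_num)]
  rw [t3]
  norm_num
  rw [pvInner_block_nil, pvTaken_one _ _ (by norm_num)]
  congr 1
  omega

lemma pvStep_b2 (b a : Nat) : pvInner 0 0 (pvCanon 0 0 0 (b+2) a) = pvCanon 0 0 0 b (a - 1) := by
  unfold pvCanon
  simp only [List.replicate_zero, List.nil_append, List.append_nil]
  rw [pvInner_block]
  have t2 : pvTaken 0 2 (b+2) = 2 := by
    simp [pvTaken, pvTaken_stop (show ¬(4:Int)+2 ≤ 5 by norm_num)]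
  rw [t2]
  norm_num
  rw [pvInner_block_nil, pvTaken_one _ _ (by norm_num)]
  congr 1
  omega

lemma pvStep_b1 (a : Nat) : pvInner 0 0 (pvCanon 0 0 0 1 a) = pvCanon 0 0 0 0 (a - 3) := by
  unfold pvCanon
  simp only [List.replicate_zero, List.nil_append, List.append_nil]
  rw [pvInner_block]
  have t2 : pvTaken 0 2 1 = 1 := by simp [pvTaken]
  rw [t2]
  norm_num
  rw [pvInner_block_nil, pvTaken_one _ _ (by norm_num)]
  congr 1
  omega

lemma pvStep_a (a : Nat) : pvInner 0 0 (pvCanon 0 0 0 0 (a+1)) = pvCanon 0 0 0 0 (a + 1 - 5) := by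
  unfold pvCanon
  simp only [List.replicate_zero, List.nil_append, List.append_nil]
  rw [pvInner_block_nil, pvTaken_one _ _ (by norm_num)]
  congr 1
  omega

lemma canon_not_empty {e d c b a : Nat} (h : 0 < e + d + c + b + a) :
    (pvCanon e d c b a).isEmpty = false := by
  rw [List.isEmpty_eq_false_iff, ← List.length_pos_iff, canon_length]
  omega

-- one outer unfold applied to a known basket step
lemma pvOuter_step {e d c b a e' d' c' b' a' : Nat}
    (hstep : pvInner 0 0 (pvCanon e d c b a) = pvCanon e' d' c' b' a')
    (hlt : e' + d' + c' + b' + a' < e + d + c + b + a) (k : Int) :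
    pvOuter (pvCanon e d c b a) k = pvOuter (pvCanon e' d' c' b' a') (k + 1) := by
  have hne : (pvCanon e d c b a).isEmpty = false :=
    canon_not_empty (show 0 < e + d + c + b + a by omega)
  rw [pvOuter, if_neg (by simp [hne])]
  rw [dif_pos (by rw [hstep, canon_length, canon_length]; omega), hstep]

lemma pvOuter_canon : ∀ (N e d c b a : Nat), e + d + c + b + a ≤ N → ∀ k : Int,
    pvOuter (pvCanon e d c b a) k = k + (pvF e d c b a : Int) := by
  intro N
  induction N with
  | zero =>
    intro e d c b a h k
    obtain ⟨he, hd, hc, hb, ha⟩ : e = 0 ∧ d = 0 ∧ c = 0 ∧ b = 0 ∧ a = 0 := by omega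
    subst he; subst hd; subst hc; subst hb; subst ha
    have hnil : pvCanon 0 0 0 0 0 = [] := by simp [pvCanon]
    rw [hnil, pvOuter]
    simp [pvF, pvA4, pvA3, pvA2, pvA1]
  | succ N ih =>
    intro e d c b a h k
    rcases e with _ | e
    · rcases d with _ | d
      · rcases c with _ | c
        · rcases b with _ | b
          · rcases a with _ | a
            · have hnil : pvCanon 0 0 0 0 0 = [] := by simp [pvCanon]
              rw [hnil, pvOuter]
              simp [pvF, pvA4, pvA3, pvA2, pvA1]
            · rw [pvOuter_step (pvStep_a a) (by omega) k, ih 0 0 0 0 (a+1-5) (by omega) (k+1)]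
              have hr : pvF 0 0 0 0 (a+1) = pvF 0 0 0 0 (a+1-5) + 1 := by
                simp [pvF, pvA4, pvA3, pvA2, pvA1]
                omega
              rw [hr]; push_cast; ring
          · rcases b with _ | b
            · rw [pvOuter_step (pvStep_b1 a) (by omega) k, ih 0 0 0 0 (a-3) (by omega) (k+1)]
              have hr : pvF 0 0 0 1 a = pvF 0 0 0 0 (a-3) + 1 := by
                simp [pvF, pvA4, pvA3, pvA2, pvA1]
                omega
              rw [hr]; push_cast; ring
            · rw [pvOuter_step (pvStep_b2 b a) (by omega) k, ih 0 0 0 b (a-1) (by omega) (k+1)]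
              have hr : pvF 0 0 0 (b+2) a = pvF 0 0 0 b (a-1) + 1 := by
                simp [pvF, pvA4, pvA3, pvA2, pvA1]
                split_ifs <;> omega
              rw [hr]; push_cast; ring
        · rcases b with _ | b
          · rw [pvOuter_step (pvStep_c0 c a) (by omega) k, ih 0 0 c 0 (a-2) (by omega) (k+1)]
            have hr : pvF 0 0 (c+1) 0 a = pvF 0 0 c 0 (a-2) + 1 := by
              simp [pvF, pvA4, pvA3, pvA2, pvA1]
              omega
            rw [hr]; push_cast; ring
          · rw [pvOuter_step (pvStep_cb c b a) (by omega) k, ih 0 0 c b a (by omega) (k+1)]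
            have hr : pvF 0 0 (c+1) (b+1) a = pvF 0 0 c b a + 1 := by
              simp [pvF, pvA4, pvA3, pvA2, pvA1]
              split_ifs <;> omega
            rw [hr]; push_cast; ring
      · rcases a with _ | a
        · rw [pvOuter_step (pvStep_d0 d c b) (by omega) k, ih 0 d c b 0 (by omega) (k+1)]
          have hr : pvF 0 (d+1) c b 0 = pvF 0 d c b 0 + 1 := by
            simp [pvF, pvA4, pvA3, pvA2, pvA1]
            split_ifs <;> omega
          rw [hr]; push_cast; ring
        · rw [pvOuter_step (pvStep_da d c b a) (by omega) k, ih 0 d c b a (by omega) (k+1)]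
          have hr : pvF 0 (d+1) c b (a+1) = pvF 0 d c b a + 1 := by
            simp [pvF, pvA4, pvA3, pvA2, pvA1]
            split_ifs <;> omega
          rw [hr]; push_cast; ring
    · rw [pvOuter_step (pvStep_e e d c b a) (by omega) k, ih e d c b a (by omega) (k+1)]
      have hr : pvF (e+1) d c b a = pvF e d c b a + 1 := by
        simp [pvF, pvA4, pvA3, pvA2, pvA1]
        split_ifs <;> omega
      rw [hr]; push_cast; ring

lemma canon_perm (e d c b a : Nat) :
    (pvCanon e d c b a).Perm
      (List.replicate a (1:Int) ++ List.replicate b 2 ++ List.replicate c 3 ++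
        List.replicate d 4 ++ List.replicate e 5) := by
  rw [List.perm_iff_count]
  intro x
  simp [pvCanon, List.count_append, List.count_replicate, beq_iff_eq]
  split_ifs <;> omega

lemma canon_sorted_desc (e d c b a : Nat) :
    (pvCanon e d c b a).Pairwise (fun x y : Int => y ≤ x) := by
  simp only [pvCanon]
  simp only [List.pairwise_append, List.pairwise_replicate, List.mem_append,
    List.mem_replicate, List.Pairwise.nil, List.not_mem_nil]
  refine ⟨?_, ⟨?_, ⟨?_, ⟨?_, ?_, ?_⟩, ?_⟩, ?_⟩, ?_⟩ <;> (intros; try simp_all) <;> omega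

lemma sorted_eq_canon (e d c b a : Nat) :
    PySem.List.sorted
      (List.replicate a (1:Int) ++ List.replicate b 2 ++ List.replicate c 3 ++
        List.replicate d 4 ++ List.replicate e 5) (fun x => x) true = pvCanon e d c b a := by
  refine List.eq_of_perm_of_sorted (le := fun x y : Int => y ≤ x)
    (fun _ _ _ _ h1 h2 => le_antisymm h2 h1) ?_ ?_ ?_
  · exact PySem.List.sorted_pairwise_rev _ _
  · exact canon_sorted_desc e d c b a
  · exact (PySem.List.sorted_perm _ _ _).trans (canon_perm e d c b a).symm

lemma mb_eq_F (A B C D E : Int) :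
    min_baskets A B C D E = (pvF E.toNat D.toNat C.toNat B.toNat A.toNat : Int) := by
  unfold min_baskets
  rw [sorted_eq_canon, pvOuter_canon (E.toNat + D.toNat + C.toNat + B.toNat + A.toNat) _ _ _ _ _ le_rfl 0]
  ring

lemma alt_eq_F (A B C D E : Int) :
    min_baskets_alt A B C D E = (pvF E.toNat D.toNat C.toNat B.toNat A.toNat : Int) := by
  have hA : max A 0 = (A.toNat : Int) := by omega
  have hB : max B 0 = (B.toNat : Int) := by omega
  have hC : max C 0 = (C.toNat : Int) := by omega
  have hD : max D 0 = (D.toNat : Int) := by omega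
  have hE : max E 0 = (E.toNat : Int) := by omega
  simp only [min_baskets_alt, hA, hB, hC, hD, hE]
  have hmin : (min (B.toNat : Int) (C.toNat : Int)) = ((min B.toNat C.toNat : Nat) : Int) := by omega
  rw [hmin]
  have hb1 : ((B.toNat : Int) - ((min B.toNat C.toNat : Nat) : Int)) = ((B.toNat - min B.toNat C.toNat : Nat) : Int) := by omega
  rw [hb1]
  have ha1 : ((A.toNat : Int) - min (A.toNat : Int) (D.toNat : Int)) = ((pvA1 D.toNat A.toNat : Nat) : Int) := by
    rw [pvA1]; omega
  rw [ha1]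
  have hc2 : (2 * ((C.toNat : Int) - ((min B.toNat C.toNat : Nat) : Int))) = ((2 * (C.toNat - min B.toNat C.toNat) : Nat) : Int) := by omega
  rw [hc2]
  have ha2 : ((pvA1 D.toNat A.toNat : Nat) : Int) - min ((pvA1 D.toNat A.toNat : Nat) : Int) ((2 * (C.toNat - min B.toNat C.toNat) : Nat) : Int) = ((pvA2 D.toNat C.toNat B.toNat A.toNat : Nat) : Int) := by
    rw [pvA2]; omega
  rw [ha2]
  have cast2 : (2:Int) = ((2:Nat):Int) := by norm_num
  have cast5 : (5:Int) = ((5:Nat):Int) := by norm_num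
  have fd2 : ∀ m : Nat, PySem.Int.floordiv (m:Int) 2 = ((m / 2 : Nat) : Int) := by
    intro m; rw [cast2, PySem.Int.floordiv_natCast]
  have fd5 : ∀ m : Nat, PySem.Int.floordiv (m:Int) 5 = ((m / 5 : Nat) : Int) := by
    intro m; rw [cast5, PySem.Int.floordiv_natCast]
  have md2 : ∀ m : Nat, PySem.Int.mod (m:Int) 2 = ((m % 2 : Nat) : Int) := by
    intro m; rw [cast2, PySem.Int.mod_natCast]
  rw [fd2, md2]
  have ha3 : ((pvA2 D.toNat C.toNat B.toNat A.toNat : Nat) : Int) - min ((pvA2 D.toNat C.toNat B.toNat A.toNat : Nat) : Int) (((B.toNat - min B.toNat C.toNat) / 2 : Nat) : Int) = ((pvA3 D.toNat C.toNat B.toNat A.toNat : Nat) : Int) := by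
    rw [pvA3]; omega
  rw [ha3]
  have hcond : ((((B.toNat - min B.toNat C.toNat) % 2 : Nat) : Int) = 1) ↔ ((B.toNat - min B.toNat C.toNat) % 2 = 1) := by omega
  rw [pvF, pvA4]
  by_cases hp : (B.toNat - min B.toNat C.toNat) % 2 = 1
  · rw [if_pos (hcond.mpr hp), if_pos (hcond.mpr hp), if_pos hp, if_pos hp]
    have ha4 : ((pvA3 D.toNat C.toNat B.toNat A.toNat : Nat) : Int) - min ((pvA3 D.toNat C.toNat B.toNat A.toNat : Nat) : Int) 3 = ((pvA3 D.toNat C.toNat B.toNat A.toNat - min (pvA3 D.toNat C.toNat B.toNat A.toNat) 3 : Nat) : Int) := by omega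
    rw [ha4]
    rw [show (((pvA3 D.toNat C.toNat B.toNat A.toNat - min (pvA3 D.toNat C.toNat B.toNat A.toNat) 3 : Nat) : Int) + 4) = (((pvA3 D.toNat C.toNat B.toNat A.toNat - min (pvA3 D.toNat C.toNat B.toNat A.toNat) 3 + 4 : Nat) : Int)) by push_cast; ring]
    rw [fd5]
    push_cast
    ring
  · rw [if_neg (fun h => hp (hcond.mp h)), if_neg (fun h => hp (hcond.mp h)), if_neg hp, if_neg hp]
    rw [show (((pvA3 D.toNat C.toNat B.toNat A.toNat : Nat) : Int) + 4) = (((pvA3 D.toNat C.toNat B.toNat A.toNat + 4 : Nat) : Int)) by push_cast; ring]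
    rw [fd5]
    push_cast
    ring

-- ===== VERDICT (by name: the statement is the Claim_ definition above) =====
theorem min_baskets_spec : Claim_equal_min_baskets := by
  intro A B C D E _
  unfold Spec_min_baskets
  rw [mb_eq_F, alt_eq_F]
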